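-- pv_equiv track=rewrite | github.com/pettepiero/Latent-Semantic-Indexing-IRS | lsi.py | remove_thousands_separator
-- ===== SOURCE A (Python) =====
-- def remove_thousands_separator(input_string: str):
--     """
--     Removes commas used as thousands separators from a string when surrounded by numbers.
--
--     Keyword arguments:
--     input_string -- The input string with commas as thousands separators.
--     Returns:
--     The input string with appropriate commas removed.
--     """
--     result = ""
--     for i, char in enumerate(input_string):
--         if (
--             char == ","
--             and i > 0
--             and i < len(input_string) - 1
--             and input_string[i - 1].isdigit()
--             and input_string[i + 1].isdigit()
--         ):
--             continue  # Skip the comma if it's between two digits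
--         result += char
--     return result
-- ===== SOURCE B (Python) =====
-- def remove_thousands_separator(input_string: str):
--     """
--     One-pass state machine: a comma seen right after a digit is held pending
--     and emitted only if the next character is not a digit.
--     """
--     out = []
--     prev_digit = False
--     pending = False
--     for ch in input_string:
--         if pending:
--             if ch.isdigit():
--                 out.append(ch)
--             else:
--                 out.append(',')
--                 out.append(ch)
--             pending = False
--         elif ch == ',' and prev_digit:
--             pending = True
--         else:
--             out.append(ch)
--         prev_digit = ch.isdigit()
--     if pending:
--         out.append(',')
--     return ''.join(out)
-- ===== Notes on version B (the rewrite author's own statement) =====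
-- stated objective: alternative
-- what changed: Replaces A's indexed lookahead (enumerate with i-1/i+1 string indexing) by a one-pass state machine that holds a comma pending after a digit and emits or drops it on the next character; also builds the result in a list joined once instead of repeated string concatenation.
import Mathlib
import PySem

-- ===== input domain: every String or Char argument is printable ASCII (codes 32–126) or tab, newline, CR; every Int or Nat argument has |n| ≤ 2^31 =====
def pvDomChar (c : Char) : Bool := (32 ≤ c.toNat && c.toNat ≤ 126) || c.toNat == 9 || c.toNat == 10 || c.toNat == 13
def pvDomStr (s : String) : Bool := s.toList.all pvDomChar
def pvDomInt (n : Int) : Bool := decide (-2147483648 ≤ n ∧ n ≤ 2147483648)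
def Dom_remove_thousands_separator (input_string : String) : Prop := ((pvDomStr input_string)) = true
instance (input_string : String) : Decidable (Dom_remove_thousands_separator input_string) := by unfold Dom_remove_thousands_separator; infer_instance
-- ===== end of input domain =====

-- B replaces A's indexed lookahead by a one-pass pending-comma state machine (same cost, no indexing).

-- ===== PORT A =====
def remove_thousands_separator (input_string : String) : String :=
  let l := input_string.toList
  let n : Int := l.length
  String.mk <| (PySem.List.enumerate l).foldl (fun result p =>
    if p.2 == ',' && decide (0 < p.1) && decide (p.1 < n - 1)
        && ((PySem.List.pyGet? l (p.1 - 1)).elim false PySem.Chars.isdigit)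
        && ((PySem.List.pyGet? l (p.1 + 1)).elim false PySem.Chars.isdigit)
    then result
    else result ++ [p.2]) []

-- ===== PORT B =====
def rts_step (st : List Char × Bool × Bool) (ch : Char) : List Char × Bool × Bool :=
  if st.2.2 then
    (if PySem.Chars.isdigit ch then st.1 ++ [ch] else st.1 ++ [',', ch],
     PySem.Chars.isdigit ch, false)
  else if ch == ',' && st.2.1 then
    (st.1, PySem.Chars.isdigit ch, true)
  else
    (st.1 ++ [ch], PySem.Chars.isdigit ch, false)

def remove_thousands_separator_alt (input_string : String) : String :=
  let st := input_string.toList.foldl rts_step ([], false, false)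
  String.mk (if st.2.2 then st.1 ++ [','] else st.1)

-- ===== PRECONDITION & SPEC =====
def Spec_remove_thousands_separator (input_string : String) (out : String) : Prop := out = remove_thousands_separator_alt input_string
instance (input_string : String) (out : String) : Decidable (Spec_remove_thousands_separator input_string out) := by unfold Spec_remove_thousands_separator; infer_instance

-- ===== CLAIM (what is proved, stated in full; the proofs are below) =====
def Claim_equal_remove_thousands_separator : Prop := ∀ (input_string : String), Dom_remove_thousands_separator input_string → Spec_remove_thousands_separator input_string (remove_thousands_separator input_string)

-- ===== LEMMAS AND PROOFS =====

/-- Local characterisation of the result: a comma is dropped iff the previous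
character was a digit (`pd`) and the next character is a digit. -/
def rtsR (pd : Bool) : List Char → List Char
  | [] => []
  | c :: rest =>
    (if c == ',' && pd && (rest.head?.elim false PySem.Chars.isdigit) then [] else [c])
      ++ rtsR (PySem.Chars.isdigit c) rest

/-- What B produces from the pending state onwards. -/
def rtsPend : List Char → List Char
  | [] => [',']
  | d :: rest =>
    if PySem.Chars.isdigit d then d :: rtsR true rest
    else ',' :: d :: rtsR (PySem.Chars.isdigit d) rest

lemma isdigit_comma : PySem.Chars.isdigit ',' = false := rfl

lemma rtsPend_eq (t : List Char) : rtsPend t = rtsR true (',' :: t) := by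
  cases t with
  | nil => simp [rtsR, rtsPend]
  | cons d rest =>
    by_cases hd : PySem.Chars.isdigit d = true
    · simp [rtsR, rtsPend, hd, isdigit_comma]
    · simp only [Bool.not_eq_true] at hd
      simp [rtsR, rtsPend, hd, isdigit_comma]

lemma rts_b_char (t : List Char) : ∀ (out : List Char) (pd : Bool),
    ((let st := t.foldl rts_step (out, pd, false)
      if st.2.2 then st.1 ++ [','] else st.1) = out ++ rtsR pd t)
    ∧ ((let st := t.foldl rts_step (out, pd, true)
      if st.2.2 then st.1 ++ [','] else st.1) = out ++ rtsPend t) := by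
  induction t with
  | nil => intro out pd; simp [rtsR, rtsPend]
  | cons c rest ih =>
    intro out pd
    constructor
    · by_cases hc : (c == ',' && pd) = true
      · have hcc : c = ',' := by
          cases h : (c == ',') with
          | false => simp [h] at hc
          | true => exact eq_of_beq h
        have hpd : pd = true := by
          cases pd with
          | false => simp at hc
          | true => rfl
        subst hcc hpd
        have : rts_step (out, true, false) ',' = (out, false, true) := by
          simp [rts_step, PySem.Chars.isdigit]
        simp only [List.foldl_cons, this]
        rw [(ih out false).2, rtsPend_eq]
      · have hstep : rts_step (out, pd, false) c = (out ++ [c], PySem.Chars.isdigit c, false) := by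
          simp only [Bool.not_eq_true] at hc
          simp [rts_step, hc]
        simp only [List.foldl_cons, hstep]
        rw [(ih (out ++ [c]) (PySem.Chars.isdigit c)).1]
        have : (c == ',' && pd && rest.head?.elim false PySem.Chars.isdigit) = false := by
          simp only [Bool.not_eq_true] at hc
          simp [hc]
        simp [rtsR, this]
    · by_cases hd : PySem.Chars.isdigit c = true
      · have hstep : rts_step (out, pd, true) c = (out ++ [c], PySem.Chars.isdigit c, false) := by
          simp [rts_step, hd]
        simp only [List.foldl_cons, hstep]
        rw [(ih (out ++ [c]) (PySem.Chars.isdigit c)).1]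
        simp [rtsPend, hd]
      · simp only [Bool.not_eq_true] at hd
        have hstep : rts_step (out, pd, true) c = (out ++ [',', c], PySem.Chars.isdigit c, false) := by
          simp [rts_step, hd]
        simp only [List.foldl_cons, hstep]
        rw [(ih (out ++ [',', c]) (PySem.Chars.isdigit c)).1]
        simp [rtsPend, hd]

lemma rts_b_eq (s : String) :
    remove_thousands_separator_alt s = String.mk (rtsR false s.toList) := by
  have h := (rts_b_char s.toList [] false).1
  simp only [List.nil_append] at h
  simp only [remove_thousands_separator_alt]
  rw [← h]

/-- previous-character-is-a-digit flag at position k of l -/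
def rtsPd (l : List Char) (k : Nat) : Bool :=
  if k = 0 then false else (l[k-1]?.elim false PySem.Chars.isdigit)

lemma rts_a_char (l : List Char) (t : List Char) : ∀ (k : Nat) (acc : List Char),
    l.drop k = t →
    (PySem.List.enumerate t (k : Int)).foldl (fun result p =>
      if p.2 == ',' && decide (0 < p.1) && decide (p.1 < (l.length : Int) - 1)
          && ((PySem.List.pyGet? l (p.1 - 1)).elim false PySem.Chars.isdigit)
          && ((PySem.List.pyGet? l (p.1 + 1)).elim false PySem.Chars.isdigit)
      then result else result ++ [p.2]) acc
    = acc ++ rtsR (rtsPd l k) t := by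
  induction t with
  | nil => intro k acc _; simp [PySem.List.enumerate_nil, rtsR]
  | cons c rest ih =>
    intro k acc hdrop
    have hk : k < l.length := by
      by_contra h
      rw [List.drop_eq_nil_of_le (Nat.le_of_not_lt h)] at hdrop
      simp at hdrop
    have hgetk : l[k]? = some c := by
      have h0 : (l.drop k)[0]? = l[k + 0]? := List.getElem?_drop
      rw [hdrop] at h0
      simpa using h0.symm
    have hdrop' : l.drop (k + 1) = rest := by
      have h := congrArg (List.drop 1) hdrop
      simpa [List.drop_drop] using h
    have hget1 : l[k+1]? = rest.head? := by
      have h0 : (l.drop (k+1))[0]? = l[(k+1) + 0]? := List.getElem?_drop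
      rw [hdrop'] at h0
      cases rest with
      | nil => simpa using h0.symm
      | cons d r => simpa using h0.symm
    -- the fold condition at (k, c) equals the rtsR condition
    have hcond : (c == ',' && decide (0 < (k : Int)) && decide ((k : Int) < (l.length : Int) - 1)
          && ((PySem.List.pyGet? l ((k : Int) - 1)).elim false PySem.Chars.isdigit)
          && ((PySem.List.pyGet? l ((k : Int) + 1)).elim false PySem.Chars.isdigit))
        = (c == ',' && rtsPd l k && (rest.head?.elim false PySem.Chars.isdigit)) := by
      by_cases hk0 : k = 0
      · subst hk0
        simp [rtsPd]
      · have hk0' : 0 < k := Nat.pos_of_ne_zero hk0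
        have h1 : ((k : Int) - 1) = ((k - 1 : Nat) : Int) := by omega
        have h2 : ((k : Int) + 1) = ((k + 1 : Nat) : Int) := by omega
        have hpg1 : PySem.List.pyGet? l ((k : Int) - 1) = l[k-1]? := by
          rw [h1, PySem.List.pyGet?_natCast]
        have hpg2 : PySem.List.pyGet? l ((k : Int) + 1) = l[k+1]? := by
          rw [h2, PySem.List.pyGet?_natCast]
        rw [hpg1, hpg2, hget1]
        have hlt : decide (0 < (k : Int)) = true := by simp; omega
        by_cases hkn : k + 1 < l.length
        · have : decide ((k : Int) < (l.length : Int) - 1) = true := by simp; omega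
          simp [this, rtsPd, hk0, hk0']
        · -- rest = [], both sides false
          have hrest : rest = [] := by
            have : l.drop (k+1) = [] := List.drop_eq_nil_of_le (by omega)
            rw [hdrop'] at this; exact this
          have : decide ((k : Int) < (l.length : Int) - 1) = false := by simp; omega
          simp [this, hrest]
    have henum : PySem.List.enumerate (c :: rest) (k : Int)
        = ((k : Int), c) :: PySem.List.enumerate rest ((k : Int) + 1) := by
      simp [PySem.List.enumerate_cons]
    rw [henum]
    simp only [List.foldl_cons]
    have hk1 : ((k : Int) + 1) = ((k + 1 : Nat) : Int) := by push_cast; ring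
    rw [hcond, hk1, ih (k+1) _ hdrop']
    have hpd1 : rtsPd l (k + 1) = PySem.Chars.isdigit c := by
      simp [rtsPd, hgetk]
    rw [hpd1]
    by_cases hc : (c == ',' && rtsPd l k && (rest.head?.elim false PySem.Chars.isdigit)) = true
    · have hcc : c = ',' := by
        have := hc
        cases h : (c == ',') with
        | false => rw [h] at this; simp at this
        | true => exact eq_of_beq h
      simp only [hc, if_true]
      have : PySem.Chars.isdigit c = false := by subst hcc; decide
      simp [rtsR, hc, this]
    · simp only [Bool.not_eq_true] at hc
      simp [rtsR, hc]

lemma rts_a_eq (s : String) :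
    remove_thousands_separator s = String.mk (rtsR false s.toList) := by
  have h := rts_a_char s.toList s.toList 0 [] (by simp)
  simp only [remove_thousands_separator]
  have hpd0 : rtsPd s.toList 0 = false := by simp [rtsPd]
  rw [hpd0] at h
  simp only [Nat.cast_zero] at h
  simp only [List.nil_append] at h
  rw [h]

-- ===== VERDICT (by name: the statement is the Claim_ definition above) =====
theorem remove_thousands_separator_spec : Claim_equal_remove_thousands_separator := by
  intro s _
  unfold Spec_remove_thousands_separator
  rw [rts_a_eq, rts_b_eq]
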